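-- pv_equiv track=rewrite | github.com/yaochen3330/interview_codes | first_question.py | min_subsequences
-- ===== SOURCE A (Python) =====
-- def min_subsequences(source: str, target: str) -> int:
--     from collections import defaultdict
--     import bisect
--
--     # Map characters in source to their positions
--     char_positions = defaultdict(list)
--     for index, char in enumerate(source):
--         char_positions[char].append(index)
--
--     # Check if all characters in target are in source
--     for char in target:
--         if char not in char_positions:
--             return -1
--
--     subseq_count = 0
--     target_index = 0
--     n = len(target)
--
--     while target_index < n:
--         subseq_count += 1
--         current_position = -1
--
--         while target_index < n:
--             char = target[target_index]
--             positions = char_positions[char]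
--             pos = bisect.bisect_right(positions, current_position)
--
--             if pos == len(positions):
--                 break  # Need a new subsequence
--
--             current_position = positions[pos]
--             target_index += 1
--
--     return subseq_count
-- ===== SOURCE B (Python) =====
-- def min_subsequences(source: str, target: str) -> int:
--     n = len(target)
--     j = 0
--     count = 0
--     while j < n:
--         count += 1
--         j2 = j
--         for ch in source:
--             if j2 < n and ch == target[j2]:
--                 j2 += 1
--         if j2 == j:
--             return -1  # no progress: target[j] does not occur in source
--         j = j2
--     return count
-- ===== Notes on version B (the rewrite author's own statement) =====
-- stated objective: simpler
-- what changed: Replaces the per-character position index (defaultdict of sorted positions + bisect) and the upfront membership scan with a plain two-pointer repeated left-to-right scan of source; -1 falls out as 'a pass made no progress' instead of a separate membership check.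
import Mathlib
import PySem

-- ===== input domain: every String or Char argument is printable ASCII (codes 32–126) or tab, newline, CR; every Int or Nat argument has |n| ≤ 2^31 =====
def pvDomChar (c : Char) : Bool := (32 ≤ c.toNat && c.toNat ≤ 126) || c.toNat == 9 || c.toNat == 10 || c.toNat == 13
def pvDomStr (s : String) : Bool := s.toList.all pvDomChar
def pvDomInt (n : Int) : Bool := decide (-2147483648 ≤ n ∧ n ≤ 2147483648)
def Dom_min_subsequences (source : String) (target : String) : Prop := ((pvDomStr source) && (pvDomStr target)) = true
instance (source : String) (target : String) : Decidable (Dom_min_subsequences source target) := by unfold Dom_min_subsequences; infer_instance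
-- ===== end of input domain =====

-- B replaces A's defaultdict-of-positions + bisect with a plain two-pointer repeated scan of source (simpler, no index structure).

-- ===== PORT A =====
-- inner `while target_index < n: … bisect_right … break` loop; returns the new target_index.
-- `positions = char_positions[target[ti]]` is written out as `cp.getD tgt[ti] []` at each use.
def pvAInner (cp : PySem.Dict Char (List Int)) (tgt : List Char) (ti : Nat) (cur : Int) : Nat :=
  if h : ti < tgt.length then
    if hp : PySem.List.bisectRight (cp.getD tgt[ti] []) cur < (cp.getD tgt[ti] []).length then
      pvAInner cp tgt (ti + 1) (cp.getD tgt[ti] [])[PySem.List.bisectRight (cp.getD tgt[ti] []) cur]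
    else ti  -- pos == len(positions): break, need a new subsequence
  else ti
termination_by tgt.length - ti

-- outer `while target_index < n` loop (subseq_count += 1; run the inner loop from current_position = -1);
-- fuel = n+1 suffices: after the membership check passed, every outer iteration advances target_index
def pvAOuter (cp : PySem.Dict Char (List Int)) (tgt : List Char) : Nat → Nat → Int → Int
  | fuel, ti, count =>
    if ti < tgt.length then
      match fuel with
      | 0 => count
      | fuel + 1 => pvAOuter cp tgt fuel (pvAInner cp tgt ti (-1)) (count + 1)
    else count

def min_subsequences (source : String) (target : String) : Int :=
  let src := source.toList
  let tgt := target.toList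
  -- char_positions: for index, char in enumerate(source): char_positions[char].append(index)
  let cp : PySem.Dict Char (List Int) :=
    (PySem.List.enumerate src 0).foldl (fun d p => d.modify p.2 [] (fun l => l ++ [p.1])) PySem.Dict.empty
  -- for char in target: if char not in char_positions: return -1
  if tgt.all (fun c => cp.contains c) then
    pvAOuter cp tgt (tgt.length + 1) 0 0
  else -1

-- ===== PORT B =====
-- one pass: for ch in source: if j2 < n and target[j2] == ch: j2 += 1
def pvBPass (src tgt : List Char) (j : Nat) : Nat :=
  src.foldl (fun j2 ch => if tgt[j2]? = some ch then j2 + 1 else j2) j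

-- while j < n loop; fuel = n+1 suffices: every non-returning iteration increases j
def pvBLoop (src tgt : List Char) : Nat → Nat → Int → Int
  | fuel, j, count =>
    if j < tgt.length then
      match fuel with
      | 0 => count
      | fuel + 1 =>
        let j2 := pvBPass src tgt j
        if j2 = j then -1 else pvBLoop src tgt fuel j2 (count + 1)
    else count

def min_subsequences_alt (source : String) (target : String) : Int :=
  pvBLoop source.toList target.toList (target.toList.length + 1) 0 0

-- ===== PRECONDITION & SPEC =====
def Spec_min_subsequences (source : String) (target : String) (out : Int) : Prop := out = min_subsequences_alt source target
instance (source : String) (target : String) (out : Int) : Decidable (Spec_min_subsequences source target out) := by unfold Spec_min_subsequences; infer_instance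

-- ===== CLAIM (what is proved, stated in full; the proofs are below) =====
def Claim_equal_min_subsequences : Prop := ∀ (source : String) (target : String), Dom_min_subsequences source target → Spec_min_subsequences source target (min_subsequences source target)

-- ===== LEMMAS AND PROOFS =====

-- the common greedy: scan a source suffix once, advancing the target pointer on each match
def pvGreedy (tgt : List Char) : List Char → Nat → Nat
  | [], j => j
  | c :: rest, j => pvGreedy tgt rest (if tgt[j]? = some c then j + 1 else j)

lemma pvBPass_eq_greedy (src tgt : List Char) (j : Nat) :
    pvBPass src tgt j = pvGreedy tgt src j := by
  induction src generalizing j with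
  | nil => rfl
  | cons c rest ih => simp [pvBPass, pvGreedy, List.foldl] at *; exact ih _

lemma pvGreedy_le (tgt l : List Char) (j : Nat) : j ≤ pvGreedy tgt l j := by
  induction l generalizing j with
  | nil => simp [pvGreedy]
  | cons c rest ih =>
    simp only [pvGreedy]
    split
    · exact le_trans (Nat.le_succ j) (ih (j + 1))
    · exact ih j

lemma pvGreedy_oob (tgt l : List Char) (j : Nat) (h : tgt.length ≤ j) : pvGreedy tgt l j = j := by
  induction l with
  | nil => rfl
  | cons c rest ih =>
    simp only [pvGreedy]
    rw [if_neg (by rw [List.getElem?_eq_none h]; simp), ih]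

lemma pvGreedy_frozen (tgt l : List Char) (j : Nat) (h : j < tgt.length)
    (hnot : tgt[j] ∉ l) : pvGreedy tgt l j = j := by
  induction l with
  | nil => rfl
  | cons c rest ih =>
    simp only [pvGreedy]
    rw [if_neg, ih (by simp at hnot; exact hnot.2)]
    intro hc
    rw [List.getElem?_eq_getElem h] at hc
    simp at hc hnot
    exact hnot.1 hc

lemma pvGreedy_progress (tgt l : List Char) (j : Nat) (h : j < tgt.length)
    (hin : tgt[j] ∈ l) : j < pvGreedy tgt l j := by
  induction l with
  | nil => simp at hin
  | cons c rest ih =>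
    simp only [pvGreedy]
    by_cases hc : tgt[j]? = some c
    · rw [if_pos hc]; exact Nat.lt_of_lt_of_le (Nat.lt_succ_self j) (pvGreedy_le tgt rest (j + 1))
    · rw [if_neg hc]
      apply ih
      rcases List.mem_cons.mp hin with h1 | h1
      · exfalso; exact hc (by rw [List.getElem?_eq_getElem h, h1])
      · exact h1

lemma pvGreedy_cap (tgt l : List Char) (j i0 : Nat) (hj : j ≤ i0) (hi : i0 < tgt.length)
    (hnot : tgt[i0] ∉ l) : pvGreedy tgt l j ≤ i0 := by
  induction l generalizing j with
  | nil => simpa [pvGreedy]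
  | cons c rest ih =>
    simp only [pvGreedy]
    have hrest : tgt[i0] ∉ rest := by simp at hnot; exact hnot.2
    split
    · rename_i hc
      apply ih _ _ hrest
      rcases Nat.lt_or_ge j i0 with h1 | h1
      · omega
      · exfalso
        have : j = i0 := le_antisymm hj h1
        subst this
        rw [List.getElem?_eq_getElem hi] at hc
        simp at hc hnot
        exact hnot.1 hc
    · exact ih _ hj hrest

-- ---- characterisation of A's char_positions dict ----

def pvCP (src : List Char) : PySem.Dict Char (List Int) :=
  (PySem.List.enumerate src 0).foldl (fun d p => d.modify p.2 [] (fun l => l ++ [p.1])) PySem.Dict.empty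

lemma pvCP_getD (src : List Char) (c : Char) :
    (pvCP src).getD c [] =
      List.map (fun p => p.2) (List.filter (fun p => p.1 == c)
        ((PySem.List.enumerate src 0).map Prod.swap)) := by
  unfold pvCP
  rw [show ((PySem.List.enumerate src 0).foldl
        (fun d p => d.modify p.2 [] (fun l => l ++ [p.1])) PySem.Dict.empty)
      = (((PySem.List.enumerate src 0).map Prod.swap).foldl
        (fun d p => d.modify p.1 [] (fun l => l ++ [p.2])) PySem.Dict.empty) from by
    rw [List.foldl_map]; rfl]
  rw [PySem.Dict.getD_foldl_modify_append]
  simp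

lemma pvCP_mem (src : List Char) (c : Char) (x : Int) :
    x ∈ (pvCP src).getD c [] ↔ ∃ (k : Nat) (hk : k < src.length), x = (k : Int) ∧ src[k] = c := by
  rw [pvCP_getD]
  constructor
  · intro hx
    simp only [List.mem_map, List.mem_filter] at hx
    obtain ⟨p, ⟨hp, hpc⟩, rfl⟩ := hx
    obtain ⟨q, hq, rfl⟩ := hp
    obtain ⟨k, hk, rfl⟩ := (PySem.List.mem_enumerate_iff src 0 q).mp hq
    exact ⟨k, hk, by simp, by simpa using hpc⟩
  · rintro ⟨k, hk, rfl, hc⟩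
    simp only [List.mem_map, List.mem_filter]
    exact ⟨(c, (k : Int)), ⟨⟨((k : Int), c),
      (PySem.List.mem_enumerate_iff src 0 _).mpr ⟨k, hk, by simp [hc]⟩, rfl⟩, by simp⟩, rfl⟩

lemma pvCP_sorted (src : List Char) (c : Char) :
    ((pvCP src).getD c []).Pairwise (fun a b => a ≤ b) := by
  rw [pvCP_getD]
  apply List.Pairwise.map
  case H => exact fun (p q : Char × Int) (h : p.2 < q.2) => le_of_lt h
  apply List.Pairwise.filter
  apply List.Pairwise.map
  case H => exact fun (p q : Int × Char) (h : p.1 < q.1) => (by simpa [Prod.swap] : (Prod.swap p).2 < (Prod.swap q).2)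
  exact PySem.List.pairwise_lt_enumerate src 0

lemma pvCP_contains (src : List Char) (c : Char) :
    (pvCP src).contains c = true ↔ c ∈ src := by
  rw [PySem.Dict.contains_iff_mem_keys]
  unfold pvCP
  rw [PySem.Dict.keys_foldl_modify_key (PySem.List.enumerate src 0) Prod.snd []
        (fun _ p l => l ++ [p.1]) PySem.Dict.empty,
      PySem.List.map_snd_enumerate]
  rw [show PySem.Dict.empty.keys = ([] : PySem.Set Char) from rfl]
  rw [show PySem.Set.update ([] : PySem.Set Char) src = PySem.Set.ofList src from by
    rw [PySem.Set.ofList_eq_foldl]; rfl]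
  exact PySem.Set.mem_ofList src c

-- bounds: every stored position is a valid source index
lemma pvCP_bound (src : List Char) (c : Char) (x : Int) (hx : x ∈ (pvCP src).getD c []) :
    0 ≤ x ∧ x < (src.length : Int) := by
  rcases (pvCP_mem src c x).mp hx with ⟨k, hk, rfl, _⟩
  constructor <;> [exact Int.natCast_nonneg k; exact_mod_cast hk]

-- ---- A's inner loop computes one greedy pass over the source suffix ----

lemma pvAInner_eq_greedy (src tgt : List Char) :
    ∀ m k, src.length - k = m → k ≤ src.length → ∀ ti,
      pvAInner (pvCP src) tgt ti ((k : Int) - 1) = pvGreedy tgt (src.drop k) ti := by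
  intro m
  induction m with
  | zero =>
    intro k hm hk ti
    have hkl : k = src.length := by omega
    subst hkl
    rw [List.drop_length]
    rw [pvAInner]
    by_cases hti : ti < tgt.length
    · rw [dif_pos hti]
      have hspec := PySem.List.bisectRight_spec ((pvCP src).getD tgt[ti] []) ((src.length : Int) - 1)
        (pvCP_sorted src tgt[ti])
      rw [dif_neg]
      · rfl
      · intro hlt
        have h3 := hspec.2.2 _ hlt (le_refl _)
        have := pvCP_bound src tgt[ti] _ (List.getElem_mem hlt)
        omega
    · rw [dif_neg hti]; rfl
  | succ m ih =>
    intro k hm hk ti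
    have hks : k < src.length := by omega
    rw [← List.getElem_cons_drop hks]
    by_cases hti : ti < tgt.length
    · set positions := (pvCP src).getD tgt[ti] [] with hpos
      have hsort := pvCP_sorted src tgt[ti]
      by_cases hc : tgt[ti] = src[k]
      · -- match: bisect finds exactly position k
        have hkmem : (k : Int) ∈ positions := (pvCP_mem src tgt[ti] k).mpr ⟨k, hks, rfl, hc.symm⟩
        rcases List.getElem_of_mem hkmem with ⟨jk, hjk, hjkeq⟩
        have hspec := PySem.List.bisectRight_spec positions ((k : Int) - 1) hsort
        set b := PySem.List.bisectRight positions ((k : Int) - 1) with hb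
        have hble : b ≤ jk := by
          by_contra hgt
          have := hspec.2.1 jk hjk (by omega)
          omega
        have hblt : b < positions.length := lt_of_le_of_lt hble hjk
        have hxb : positions[b] = (k : Int) := by
          have hge : ((k : Int) - 1) < positions[b] := hspec.2.2 b hblt (le_refl _)
          rcases Nat.lt_or_ge b jk with h1 | h1
          · have hmono : positions[b] ≤ positions[jk] := (List.pairwise_iff_getElem.mp hsort) b jk hblt hjk h1
            omega
          · have : b = jk := le_antisymm hble h1
            subst this
            omega
        rw [pvAInner, dif_pos hti, dif_pos (by rw [← hpos]; exact hblt)]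
        rw [show ((pvCP src).getD tgt[ti] [])[PySem.List.bisectRight ((pvCP src).getD tgt[ti] []) ((k:Int)-1)] = positions[b] from rfl]
        rw [hxb]
        have hrec := ih (k + 1) (by omega) (by omega) (ti + 1)
        rw [show ((k : Int)) = (((k+1 : Nat) : Int) - 1) from by push_cast; ring]
        rw [hrec]
        simp only [pvGreedy]
        rw [if_pos (by rw [List.getElem?_eq_getElem hti, hc])]
      · -- no match at k: bisect over k-1 and over k agree, step the suffix
        have hknot : (k : Int) ∉ positions := by
          intro hmem
          rcases (pvCP_mem src tgt[ti] _).mp hmem with ⟨k', hk', hkeq, hck⟩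
          have : k' = k := by exact_mod_cast hkeq.symm
          subst this
          exact hc hck.symm
        have hspec1 := PySem.List.bisectRight_spec positions ((k : Int) - 1) hsort
        have hspec2 := PySem.List.bisectRight_spec positions (k : Int) hsort
        set b1 := PySem.List.bisectRight positions ((k : Int) - 1) with hb1
        set b2 := PySem.List.bisectRight positions (k : Int) with hb2
        have hbeq : b1 = b2 := by
          rcases Nat.lt_trichotomy b1 b2 with h1 | h1 | h1
          · have hlt : b1 < positions.length := lt_of_lt_of_le h1 hspec2.1
            have hgt := hspec1.2.2 b1 hlt (le_refl _)
            have hle := hspec2.2.1 b1 hlt h1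
            have : positions[b1] = (k : Int) := by omega
            exact absurd (this ▸ List.getElem_mem hlt) hknot
          · exact h1
          · have hlt : b2 < positions.length := lt_of_lt_of_le h1 hspec1.1
            have hgt := hspec2.2.2 b2 hlt (le_refl _)
            have hle := hspec1.2.1 b2 hlt h1
            omega
        have hstep : pvAInner (pvCP src) tgt ti ((k : Int) - 1) = pvAInner (pvCP src) tgt ti (k : Int) := by
          conv_lhs => rw [pvAInner]
          conv_rhs => rw [pvAInner]
          rw [dif_pos hti, dif_pos hti]
          rw [show PySem.List.bisectRight ((pvCP src).getD tgt[ti] []) ((k : Int) - 1) = b1 from rfl]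
          rw [show PySem.List.bisectRight ((pvCP src).getD tgt[ti] []) (k : Int) = b2 from rfl]
          rw [hbeq]
        rw [hstep]
        rw [show ((k : Int)) = (((k+1 : Nat) : Int) - 1) from by push_cast; ring]
        rw [ih (k + 1) (by omega) (by omega) ti]
        simp only [pvGreedy]
        rw [if_neg (by rw [List.getElem?_eq_getElem hti]; simp; intro hcc; exact hc hcc)]
    · -- target pointer already exhausted: both sides return ti
      rw [pvAInner, dif_neg hti, pvGreedy_oob tgt _ ti (le_of_not_gt hti)]

lemma pvAInner_zero (src tgt : List Char) (ti : Nat) :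
    pvAInner (pvCP src) tgt ti (-1) = pvGreedy tgt src ti := by
  have := pvAInner_eq_greedy src tgt (src.length - 0) 0 rfl (Nat.zero_le _) ti
  simpa using this

-- ---- outer loops agree ----

lemma pvOuter_eq_of_mem (src tgt : List Char) (hmem : ∀ c ∈ tgt, c ∈ src) :
    ∀ fuel j count, pvAOuter (pvCP src) tgt fuel j count = pvBLoop src tgt fuel j count := by
  intro fuel
  induction fuel with
  | zero => intro j count; simp [pvAOuter, pvBLoop]
  | succ f ih =>
    intro j count
    simp only [pvAOuter, pvBLoop]
    by_cases hj : j < tgt.length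
    · rw [if_pos hj, if_pos hj]
      have hpass : pvBPass src tgt j = pvGreedy tgt src j := pvBPass_eq_greedy src tgt j
      have hprog : j < pvGreedy tgt src j :=
        pvGreedy_progress tgt src j hj (hmem _ (List.getElem_mem hj))
      rw [pvAInner_zero]
      simp only [hpass]
      rw [if_neg (by omega)]
      exact ih _ _
    · rw [if_neg hj, if_neg hj]

lemma pvBLoop_neg (src tgt : List Char) (i0 : Nat) (hi0 : i0 < tgt.length)
    (hbad : tgt[i0] ∉ src) (hmin : ∀ i, i < i0 → ∀ h : i < tgt.length, tgt[i] ∈ src) :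
    ∀ fuel j count, j ≤ i0 → i0 - j < fuel → pvBLoop src tgt fuel j count = -1 := by
  intro fuel
  induction fuel with
  | zero => intro j count _ h; omega
  | succ f ih =>
    intro j count hj hf
    have hjlt : j < tgt.length := lt_of_le_of_lt hj hi0
    simp only [pvBLoop, if_pos hjlt]
    rw [pvBPass_eq_greedy]
    rcases Nat.lt_or_ge j i0 with h1 | h1
    · have hprog : j < pvGreedy tgt src j :=
        pvGreedy_progress tgt src j hjlt (hmin j h1 hjlt)
      have hcap : pvGreedy tgt src j ≤ i0 := pvGreedy_cap tgt src j i0 hj hi0 hbad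
      rw [if_neg (by omega)]
      exact ih _ _ hcap (by omega)
    · have : j = i0 := le_antisymm hj h1
      subst this
      rw [pvGreedy_frozen tgt src j hjlt hbad, if_pos rfl]

-- ===== VERDICT (by name: the statement is the Claim_ definition above) =====
theorem min_subsequences_spec : Claim_equal_min_subsequences := by
  intro source target _
  unfold Spec_min_subsequences min_subsequences min_subsequences_alt
  set src := source.toList
  set tgt := target.toList
  simp only []
  rw [show ((PySem.List.enumerate src 0).foldl (fun d p => d.modify p.2 [] (fun l => l ++ [p.1])) PySem.Dict.empty) = pvCP src from rfl]
  by_cases hall : tgt.all (fun c => (pvCP src).contains c)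
  · rw [if_pos hall]
    apply pvOuter_eq_of_mem
    intro c hc
    have := (List.all_eq_true.mp hall) c hc
    exact (pvCP_contains src c).mp this
  · rw [if_neg hall]
    -- some target char is missing from source
    have hex : ∃ i : Nat, i < tgt.length ∧ ∀ h : i < tgt.length, tgt[i] ∉ src := by
      rw [List.all_eq_true] at hall
      rcases not_forall.mp hall with ⟨c, hc⟩
      rcases Classical.not_imp.mp hc with ⟨hcmem, hcon⟩
      rcases List.getElem_of_mem hcmem with ⟨i, hi, rfl⟩
      exact ⟨i, hi, fun _ h => hcon (by simpa using (pvCP_contains src _).mpr h)⟩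
    classical
    have hP : ∃ i, i < tgt.length ∧ ∀ h : i < tgt.length, tgt[i] ∉ src := hex
    have hi0 := Nat.find_spec hP
    symm
    apply pvBLoop_neg src tgt (Nat.find hP) hi0.1 (hi0.2 hi0.1)
    · intro i hi hilt
      by_contra hnot
      exact Nat.find_min hP hi ⟨hilt, fun _ => hnot⟩
    · exact Nat.zero_le _
    · omega
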